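-- pv_equiv track=rewrite | github.com/nemmiz/aoc2021 | python/07.py | cost_part2
-- ===== SOURCE A (Python) =====
-- def cost_part2(positions, target, best):
--     total_cost = 0
--     for pos in positions:
--         dist = abs(target - pos)
--         total_cost += dist * (dist + 1) // 2
--         if total_cost > best:
--             break
--     return total_cost
-- ===== SOURCE B (Python) =====
-- def cost_part2(positions, target, best):
--     # Two-phase: build per-position triangular costs and their prefix sums,
--     # then search for the first prefix sum exceeding best.
--     costs = [abs(target - p) * (abs(target - p) + 1) // 2 for p in positions]
--     prefix = []
--     s = 0
--     for c in costs:
--         s += c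
--         prefix.append(s)
--     for p in prefix:
--         if p > best:
--             return p
--     return prefix[-1] if prefix else 0
-- ===== Notes on version B (the rewrite author's own statement) =====
-- stated objective: alternative
-- what changed: Replaces the fused accumulate-and-break loop by a table-building phase (per-position triangular costs, then prefix sums) followed by a separate threshold-search pass that returns the first prefix sum exceeding best, falling back to the last prefix sum (0 for empty input).
import Mathlib
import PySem

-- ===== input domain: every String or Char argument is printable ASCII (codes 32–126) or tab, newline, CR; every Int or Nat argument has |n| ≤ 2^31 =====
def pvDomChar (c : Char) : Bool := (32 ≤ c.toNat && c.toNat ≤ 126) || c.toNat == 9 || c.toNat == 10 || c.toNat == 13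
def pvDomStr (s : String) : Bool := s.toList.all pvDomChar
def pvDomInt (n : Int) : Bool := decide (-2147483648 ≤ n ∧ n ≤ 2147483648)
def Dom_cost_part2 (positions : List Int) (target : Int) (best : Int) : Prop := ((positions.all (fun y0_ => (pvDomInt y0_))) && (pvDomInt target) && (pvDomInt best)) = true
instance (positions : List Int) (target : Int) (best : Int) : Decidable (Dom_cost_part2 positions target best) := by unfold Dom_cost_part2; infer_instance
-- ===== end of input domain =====

-- B replaces A's fused accumulate-and-break loop by a cost table + prefix sums + separate threshold search (alternative decomposition, same cost).


-- ===== PORT A =====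
-- the single fused loop with early break, as structural recursion carrying total_cost
def costA_loop (target best : Int) (acc : Int) : List Int → Int
  | [] => acc
  | p :: ps =>
    let dist := |target - p|
    let acc' := acc + PySem.Int.floordiv (dist * (dist + 1)) 2
    if acc' > best then acc' else costA_loop target best acc' ps

def cost_part2 (positions : List Int) (target : Int) (best : Int) : Int :=
  costA_loop target best 0 positions

-- ===== PORT B =====
-- phase 1a: per-position triangular costs (the list comprehension)
def altCosts (target : Int) (positions : List Int) : List Int :=
  positions.map (fun p => PySem.Int.floordiv (|target - p| * (|target - p| + 1)) 2)

-- phase 1b: prefix sums (the loop appending the running sum s)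
def altPrefix (s : Int) : List Int → List Int
  | [] => []
  | c :: cs => (s + c) :: altPrefix (s + c) cs

-- phase 2: first element strictly greater than best (the search loop)
def altFind (best : Int) : List Int → Option Int
  | [] => none
  | p :: ps => if p > best then some p else altFind best ps

def cost_part2_alt (positions : List Int) (target : Int) (best : Int) : Int :=
  let pre := altPrefix 0 (altCosts target positions)
  match altFind best pre with
  | some v => v
  | none => match pre.getLast? with
            | some v => v
            | none => 0

-- ===== PRECONDITION & SPEC =====
def Spec_cost_part2 (positions : List Int) (target : Int) (best : Int) (out : Int) : Prop := out = cost_part2_alt positions target best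
instance (positions : List Int) (target : Int) (best : Int) (out : Int) : Decidable (Spec_cost_part2 positions target best out) := by unfold Spec_cost_part2; infer_instance

-- ===== CLAIM (what is proved, stated in full; the proofs are below) =====
def Claim_equal_cost_part2 : Prop := ∀ (positions : List Int) (target : Int) (best : Int), Dom_cost_part2 positions target best → Spec_cost_part2 positions target best (cost_part2 positions target best)

-- ===== LEMMAS AND PROOFS =====
-- proof-only abstraction of A's loop over an already-computed cost list
def loopA (best : Int) (acc : Int) : List Int → Int
  | [] => acc
  | c :: cs =>
    let acc' := acc + c
    if acc' > best then acc' else loopA best acc' cs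

-- A's loop over positions is loopA over the cost table
theorem costA_loop_eq_loopA (target best : Int) : ∀ (ps : List Int) (acc : Int),
    costA_loop target best acc ps = loopA best acc (altCosts target ps) := by
  intro ps
  induction ps with
  | nil => intro acc; rfl
  | cons p ps ih =>
    intro acc
    show (if _ > best then _ else costA_loop target best _ ps) = _
    simp only [altCosts, List.map_cons, loopA, ih, altCosts]

-- invariant: A's loop from accumulator acc equals B's search over the prefix sums
-- started at acc, with acc itself as the empty fallback
theorem loopA_eq (best : Int) : ∀ (cs : List Int) (acc : Int),
    loopA best acc cs =
      (match altFind best (altPrefix acc cs) with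
       | some v => v
       | none => match (altPrefix acc cs).getLast? with
                 | some v => v
                 | none => acc) := by
  intro cs
  induction cs with
  | nil => intro acc; rfl
  | cons c cs ih =>
    intro acc
    simp only [loopA, altPrefix, altFind]
    by_cases h : acc + c > best
    · simp [h]
    · simp only [h, if_false]
      rw [ih]
      cases cs with
      | nil => simp [altPrefix, altFind]
      | cons d ds =>
        simp only [altPrefix]
        cases hf : altFind best ((acc + c + d) :: altPrefix (acc + c + d) ds) with
        | some v => simp
        | none =>
          cases hL : ((acc + c + d) :: altPrefix (acc + c + d) ds).getLast? with
          | some v => simp [hL]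
          | none => simp at hL

-- ===== VERDICT (by name: the statement is the Claim_ definition above) =====
theorem cost_part2_spec : Claim_equal_cost_part2 := by
  intro positions target best _
  unfold Spec_cost_part2 cost_part2 cost_part2_alt
  rw [costA_loop_eq_loopA, loopA_eq]
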